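-- pv_equiv track=rewrite | github.com/StFavn/PythonBasic_skillbox | Module18/10_the_truth/main.py | transformations
-- ===== SOURCE A (Python) =====
-- def text_shift(shift, user_text):
--     len_text = len(user_text)
--     return ''.join([user_text[(i + shift) % len_text] for i in range(len_text)])
--
-- def transformations(user_text):
--     list_text = user_text.split()
--
--     new_text, sentence, i = [], [], -3
--     for word in list_text:
--         sentence.append(word)
--         if '/' in word:
--             sentence = [text_shift(i, a_word) for a_word in sentence]
--             new_text.append(' '.join(sentence))
--             sentence = []
--             i -= 1
--     sentence = [text_shift(i, a_word) for a_word in sentence]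
--     new_text.append(' '.join(sentence))
--     return '\n'.join(new_text)
-- ===== SOURCE B (Python) =====
-- def transformations(user_text):
--     # Pass 1: group words into sentences, closing a group at each word containing '/'.
--     words = user_text.split()
--     groups, cur = [], []
--     for w in words:
--         cur.append(w)
--         if '/' in w:
--             groups.append(cur)
--             cur = []
--     groups.append(cur)  # trailing (possibly empty) group, as the original always emits it
--     # Pass 2: group k is rotated by -3 - k; rotation done by slicing.
--     lines = []
--     for k, g in enumerate(groups):
--         shifted = []
--         for w in g:
--             s = (-3 - k) % len(w)
--             shifted.append(w[s:] + w[:s])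
--         lines.append(' '.join(shifted))
--     return '\n'.join(lines)
-- ===== Notes on version B (the rewrite author's own statement) =====
-- stated objective: faster
-- what changed: B separates the work into two passes -- first group the words into sentence-groups (closing a group at each word containing '/'), then shift group k by -3-k using slice-based rotation w[s:]+w[:s] -- replacing A's single interleaved loop whose per-character index comprehension is the hot path.
import Mathlib
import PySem

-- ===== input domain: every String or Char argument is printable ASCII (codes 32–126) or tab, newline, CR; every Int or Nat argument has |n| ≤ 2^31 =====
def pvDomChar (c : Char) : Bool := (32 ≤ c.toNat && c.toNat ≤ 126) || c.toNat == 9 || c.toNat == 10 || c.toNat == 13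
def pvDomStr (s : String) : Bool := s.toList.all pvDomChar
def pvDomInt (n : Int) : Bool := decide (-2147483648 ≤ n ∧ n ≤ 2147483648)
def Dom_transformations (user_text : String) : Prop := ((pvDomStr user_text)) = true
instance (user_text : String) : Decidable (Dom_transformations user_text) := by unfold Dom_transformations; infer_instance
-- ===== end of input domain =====

-- B regroups the words in one pass and then rotates each group by slicing in a second
-- pass, instead of A's single interleaved loop with per-character index arithmetic.

-- ===== PORT A =====
-- text_shift: ''.join(user_text[(i+shift)%len] for i in range(len)); getD's default is never
-- reached (the mod index is in range whenever the range is nonempty), keeping the port total.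
def textShift (shift : Int) (w : String) : String :=
  String.ofList ((PySem.List.pyRange 0 (w.toList.length : Int) 1).map
    (fun i => PySem.List.pyGetD w.toList (PySem.Int.mod (i + shift) (w.toList.length : Int)) ' '))

def transformations (user_text : String) : String :=
  let st := (PySem.Str.split₀ user_text).foldl
    (fun (acc : List String × List String × Int) word =>
      if PySem.Str.isIn "/" word then
        (acc.1 ++ [PySem.Str.join " " ((acc.2.1 ++ [word]).map (fun a_word => textShift acc.2.2 a_word))],
         [], acc.2.2 - 1)
      else (acc.1, acc.2.1 ++ [word], acc.2.2))
    ([], [], -3)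
  PySem.Str.join "\n" (st.1 ++ [PySem.Str.join " " (st.2.1.map (fun a_word => textShift st.2.2 a_word))])

-- ===== PORT B =====
-- Source B's inline rotation of a word of group k: s = (-3-k) % len(w); w[s:] + w[:s]
def rotWord (k : Int) (w : String) : String :=
  let s := PySem.Int.mod (-3 - k) (w.toList.length : Int)
  String.ofList (PySem.List.slice w.toList (some s) none ++ PySem.List.slice w.toList none (some s))

def transformations_alt (user_text : String) : String :=
  let gp := (PySem.Str.split₀ user_text).foldl
    (fun (acc : List (List String) × List String) w =>
      if PySem.Str.isIn "/" w then (acc.1 ++ [acc.2 ++ [w]], ([] : List String))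
      else (acc.1, acc.2 ++ [w]))
    ([], [])
  PySem.Str.join "\n" ((PySem.List.enumerate (gp.1 ++ [gp.2]) 0).map
    (fun p => PySem.Str.join " " (p.2.map (fun w => rotWord p.1 w))))

-- ===== PRECONDITION & SPEC =====
def Spec_transformations (user_text : String) (out : String) : Prop := out = transformations_alt user_text
instance (user_text : String) (out : String) : Decidable (Spec_transformations user_text out) := by unfold Spec_transformations; infer_instance

-- ===== CLAIM (what is proved, stated in full; the proofs are below) =====
def Claim_equal_transformations : Prop := ∀ (user_text : String), Dom_transformations user_text → Spec_transformations user_text (transformations user_text)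

-- ===== LEMMAS AND PROOFS =====

-- (i + s) % n only depends on s % n
theorem emod_add_right_emod (i s n : Int) : (i + s) % n = (i + s % n) % n := by
  have hs : n * (s / n) + s % n = s := Int.ediv_add_emod s n
  calc (i + s) % n = ((i + s % n) + n * (s / n)) % n := by
        rw [show (i + s % n) + n * (s / n) = i + (n * (s / n) + s % n) by ring, hs]
  _ = (i + s % n) % n := Int.add_mul_emod_self_left _ _ _

-- core rotation fact, on lists: A's index-comprehension equals drop/take slicing
theorem rot_list (s : Int) (cs : List Char) (hne : cs ≠ []) :
    (PySem.List.pyRange 0 (cs.length : Int) 1).map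
      (fun i => PySem.List.pyGetD cs ((i + s) % (cs.length : Int)) ' ')
    = cs.drop (s % (cs.length : Int)).toNat ++ cs.take (s % (cs.length : Int)).toNat := by
  have hm : 0 < cs.length := List.length_pos_of_ne_nil hne
  have hmz : (0:Int) < (cs.length : Int) := by exact_mod_cast hm
  have hj0 : 0 ≤ s % (cs.length : Int) := Int.emod_nonneg s (by omega)
  have hjlt : s % (cs.length : Int) < (cs.length : Int) := Int.emod_lt_of_pos s hmz
  set jn := (s % (cs.length : Int)).toNat with hjn
  have hjcast : (jn : Int) = s % (cs.length : Int) := Int.toNat_of_nonneg hj0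
  have hjnm : jn < cs.length := by omega
  apply List.ext_getElem
  · simp only [List.length_map, PySem.List.length_pyRange_one, List.length_append,
      List.length_drop, List.length_take]
    omega
  · intro i h1 h2
    have hi : i < cs.length := by
      simpa only [List.length_map, PySem.List.length_pyRange_one, Int.sub_zero,
        Int.toNat_natCast] using h1
    simp only [List.getElem_map, PySem.List.getElem_pyRange_one, zero_add]
    have he : ((i : Int) + s) % (cs.length : Int) =
        if (i : Int) + (jn : Int) < (cs.length : Int) then (i : Int) + (jn : Int)
        else (i : Int) + (jn : Int) - (cs.length : Int) := by
      rw [emod_add_right_emod, ← hjcast]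
      split_ifs with hlt
      · exact Int.emod_eq_of_lt (by omega) hlt
      · calc ((i : Int) + (jn : Int)) % (cs.length : Int)
            = (((i : Int) + (jn : Int) - (cs.length : Int)) + (cs.length : Int) * 1) % (cs.length : Int) := by
              congr 1; ring
        _ = ((i : Int) + (jn : Int) - (cs.length : Int)) % (cs.length : Int) :=
              Int.add_mul_emod_self_left _ _ _
        _ = (i : Int) + (jn : Int) - (cs.length : Int) := Int.emod_eq_of_lt (by omega) (by omega)
    rw [he]
    by_cases hc : i + jn < cs.length
    · rw [if_pos (by omega)]
      rw [PySem.List.pyGetD_eq_getElem cs ' ' (by positivity) (by omega)]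
      have hdl : i < (cs.drop jn).length := by simp only [List.length_drop]; omega
      rw [List.getElem_append_left hdl, List.getElem_drop]
      congr 1
      omega
    · rw [if_neg (by omega)]
      rw [PySem.List.pyGetD_eq_getElem cs ' ' (by omega) (by omega)]
      have hdl : (cs.drop jn).length ≤ i := by simp only [List.length_drop]; omega
      rw [List.getElem_append_right hdl, List.getElem_take]
      congr 1
      simp only [List.length_drop]
      omega

-- per-word agreement: A's index-arithmetic shift equals B's slice rotation
theorem textShift_eq_rotWord (k : Int) (w : String) :
    textShift (-3 - k) w = rotWord k w := by
  simp only [textShift, rotWord]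
  by_cases hne : w.toList = []
  · rw [hne]
    simp [PySem.List.slice, PySem.List.clampIdx, PySem.List.pyRange_one_eq_nil le_rfl]
  · have hm : 0 < w.toList.length := List.length_pos_of_ne_nil hne
    have hmz : (0:Int) < (w.toList.length : Int) := by exact_mod_cast hm
    have hj0 : 0 ≤ (-3 - k) % (w.toList.length : Int) := Int.emod_nonneg _ (by omega)
    simp only [PySem.Int.mod_eq_emod_of_pos hmz]
    rw [PySem.List.slice_from _ hj0, PySem.List.slice_to _ hj0]
    rw [rot_list (-3 - k) w.toList hne]

-- loop invariant: A's fold state is the image of B's fold state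
theorem loop_eq (ws : List String) (groups : List (List String)) (cur : List String) :
    ws.foldl
      (fun (acc : List String × List String × Int) word =>
        if PySem.Str.isIn "/" word then
          (acc.1 ++ [PySem.Str.join " " ((acc.2.1 ++ [word]).map (fun a_word => textShift acc.2.2 a_word))],
           [], acc.2.2 - 1)
        else (acc.1, acc.2.1 ++ [word], acc.2.2))
      ((PySem.List.enumerate groups 0).map
        (fun p => PySem.Str.join " " (p.2.map (fun w => rotWord p.1 w))), cur,
       -3 - (groups.length : Int))
    =
    ((PySem.List.enumerate (ws.foldl
        (fun (acc : List (List String) × List String) w =>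
          if PySem.Str.isIn "/" w then (acc.1 ++ [acc.2 ++ [w]], ([] : List String))
          else (acc.1, acc.2 ++ [w]))
        (groups, cur)).1 0).map
        (fun p => PySem.Str.join " " (p.2.map (fun w => rotWord p.1 w))),
     (ws.foldl
        (fun (acc : List (List String) × List String) w =>
          if PySem.Str.isIn "/" w then (acc.1 ++ [acc.2 ++ [w]], ([] : List String))
          else (acc.1, acc.2 ++ [w]))
        (groups, cur)).2,
     -3 - ((ws.foldl
        (fun (acc : List (List String) × List String) w =>
          if PySem.Str.isIn "/" w then (acc.1 ++ [acc.2 ++ [w]], ([] : List String))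
          else (acc.1, acc.2 ++ [w]))
        (groups, cur)).1.length : Int)) := by
  induction ws generalizing groups cur with
  | nil => simp
  | cons w ws ih =>
    by_cases h : PySem.Str.isIn "/" w = true
    · simp only [List.foldl_cons, h, if_true]
      have hgrp : ((PySem.List.enumerate groups 0).map
            (fun p => PySem.Str.join " " (p.2.map (fun w => rotWord p.1 w)))) ++
            [PySem.Str.join " " ((cur ++ [w]).map (fun a_word => textShift (-3 - (groups.length : Int)) a_word))]
          = (PySem.List.enumerate (groups ++ [cur ++ [w]]) 0).map
            (fun p => PySem.Str.join " " (p.2.map (fun w => rotWord p.1 w))) := by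
        rw [PySem.List.enumerate_append, PySem.List.enumerate_cons, PySem.List.enumerate_nil]
        simp only [List.map_append, List.map_cons, List.map_nil, zero_add, textShift_eq_rotWord]
      have hcnt : -3 - (groups.length : Int) - 1 = -3 - (((groups ++ [cur ++ [w]]).length : Int)) := by
        simp only [List.length_append, List.length_cons, List.length_nil]
        push_cast
        ring
      rw [hgrp, hcnt]
      exact ih (groups ++ [cur ++ [w]]) []
    · simp only [List.foldl_cons, h, if_false, Bool.false_eq_true]
      exact ih groups (cur ++ [w])

-- ===== VERDICT (by name: the statement is the Claim_ definition above) =====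
theorem transformations_spec : Claim_equal_transformations := by
  intro u _
  unfold Spec_transformations
  simp only [transformations, transformations_alt]
  have h0 := loop_eq (PySem.Str.split₀ u) [] []
  simp only [PySem.List.enumerate_nil, List.map_nil, List.length_nil, Nat.cast_zero, sub_zero] at h0
  rw [h0]
  rw [PySem.List.enumerate_append, PySem.List.enumerate_cons, PySem.List.enumerate_nil]
  simp only [List.map_append, List.map_cons, List.map_nil, zero_add, textShift_eq_rotWord]
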